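-- pv_equiv track=rewrite | github.com/ZachSkiba/Expense_Tracker | models/budget_helpers.py | group_similar_strings
-- ===== SOURCE A (Python) =====
-- def group_similar_strings(strings, similarity_threshold=0.7):
--     """
--     Group similar strings together using simple keyword matching.
--
--     Args:
--         strings: list - List of strings to group
--         similarity_threshold: float - Not used, kept for future enhancement
--
--     Returns:
--         dict: Mapping of representative string to list of similar strings
--     """
--     if not strings:
--         return {}
--
--     # Simple grouping by common keywords
--     groups = {}
--
--     for s in strings:
--         s_lower = s.lower().strip()
--
--         # Find if this belongs to an existing group
--         found_group = False
--         for group_key in groups.keys():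
--             group_key_lower = group_key.lower()
--
--             # Check if they share common words (simple approach)
--             s_words = set(s_lower.split())
--             key_words = set(group_key_lower.split())
--
--             # If they share at least one significant word (length > 3)
--             common_words = [w for w in s_words & key_words if len(w) > 3]
--
--             if common_words:
--                 groups[group_key].append(s)
--                 found_group = True
--                 break
--
--         # If no group found, create new group
--         if not found_group:
--             groups[s] = [s]
--
--     return groups
-- ===== SOURCE B (Python) =====
-- def group_similar_strings(strings, similarity_threshold=0.7):
--     """Group strings sharing a significant (>3 char) word with the earliest-created group.
--
--     One pass with an inverted index: each significant word maps to the first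
--     group that introduced it, so no rescan of existing group keys is needed.
--     """
--     groups = {}
--     index = {}  # significant word -> (creation_pos, group_key); earliest creation wins
--     pos = 0
--     for s in strings:
--         words = s.lower().split()
--         best = None
--         for w in words:
--             if len(w) > 3:
--                 e = index.get(w)
--                 if e is not None and (best is None or e[0] < best[0]):
--                     best = e
--         if best is not None:
--             groups[best[1]].append(s)
--         else:
--             groups[s] = [s]
--             for w in words:
--                 if len(w) > 3 and w not in index:
--                     index[w] = (pos, s)
--             pos += 1
--     return groups
-- ===== Notes on version B (the rewrite author's own statement) =====
-- stated objective: faster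
-- what changed: A rescans every existing group key (re-splitting and re-lowering each key) for each input string; B builds an inverted index from significant word to the earliest group that introduced it, so each string is classified by dictionary lookups on its own words in a single pass.
import Mathlib
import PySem

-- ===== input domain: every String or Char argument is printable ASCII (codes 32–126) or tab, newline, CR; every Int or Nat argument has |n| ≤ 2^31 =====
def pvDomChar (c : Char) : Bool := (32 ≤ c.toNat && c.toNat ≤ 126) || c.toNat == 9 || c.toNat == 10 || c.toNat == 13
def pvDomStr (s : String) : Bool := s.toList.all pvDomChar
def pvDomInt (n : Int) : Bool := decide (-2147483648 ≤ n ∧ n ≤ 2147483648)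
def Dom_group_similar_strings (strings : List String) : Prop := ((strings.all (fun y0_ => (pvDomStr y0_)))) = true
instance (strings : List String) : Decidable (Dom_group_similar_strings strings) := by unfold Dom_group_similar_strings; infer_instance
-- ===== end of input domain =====

-- B replaces A's per-string rescan of all existing group keys by an inverted index
-- (significant word -> earliest group that introduced it), a single pass over the input.

-- ===== PORT A =====
-- A's inner 'for group_key in groups.keys(): … break' loop: first key sharing a significant word
def pvFindGroup (sWords : PySem.Set String) : List String → Option String
  | [] => none
  | k :: rest =>
    let keyWords : PySem.Set String := PySem.Set.ofList (PySem.Str.split₀ (PySem.Str.lower k))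
    let commonWords := (PySem.Set.inter sWords keyWords).filter (fun w => decide (3 < PySem.Str.len w))
    if commonWords.isEmpty then pvFindGroup sWords rest else some k

-- body of A's outer loop over strings
def pvStepA (g : PySem.Dict String (List String)) (s : String) : PySem.Dict String (List String) :=
  let sWords : PySem.Set String := PySem.Set.ofList (PySem.Str.split₀ (PySem.Str.strip (PySem.Str.lower s)))
  match pvFindGroup sWords g.keys with
  | some k => g.modify k [] (fun v => v ++ [s])
  | none => g.insert s [s]

def group_similar_strings (strings : List String) : List (String × List String) :=
  if strings.isEmpty then []
  else (strings.foldl pvStepA PySem.Dict.empty).items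

-- ===== PORT B =====
-- Source B's 'best = …' loop: index entry of the earliest-created candidate group
def pvBest (ix : PySem.Dict String (Int × String)) (ws : List String) : Option (Int × String) :=
  ws.foldl (fun best w =>
    if 3 < PySem.Str.len w then
      match ix.get? w with
      | some e =>
        match best with
        | none => some e
        | some b => if e.1 < b.1 then some e else some b
      | none => best
    else best) none

-- Source B's 'for w in words: if len(w) > 3 and w not in index: index[w] = (pos, s)'
def pvRegister (ix : PySem.Dict String (Int × String)) (ws : List String) (pos : Int) (s : String) :
    PySem.Dict String (Int × String) :=
  ws.foldl (fun ix w =>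
    if decide (3 < PySem.Str.len w) && !ix.contains w then ix.insert w (pos, s) else ix) ix

-- body of Source B's loop over strings; state = (groups, index, pos)
def pvStepB (st : PySem.Dict String (List String) × PySem.Dict String (Int × String) × Int)
    (s : String) : PySem.Dict String (List String) × PySem.Dict String (Int × String) × Int :=
  let ws := PySem.Str.split₀ (PySem.Str.lower s)
  match pvBest st.2.1 ws with
  | some e => (st.1.modify e.2 [] (fun v => v ++ [s]), st.2.1, st.2.2)
  | none => (st.1.insert s [s], pvRegister st.2.1 ws st.2.2 s, st.2.2 + 1)

def group_similar_strings_alt (strings : List String) : List (String × List String) :=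
  (strings.foldl pvStepB (PySem.Dict.empty, PySem.Dict.empty, 0)).1.items

-- ===== PRECONDITION & SPEC =====
def Spec_group_similar_strings (strings : List String) (out : List (String × List String)) : Prop := out = group_similar_strings_alt strings
instance (strings : List String) (out : List (String × List String)) : Decidable (Spec_group_similar_strings strings out) := by unfold Spec_group_similar_strings; infer_instance

-- ===== CLAIM (what is proved, stated in full; the proofs are below) =====
def Claim_equal_group_similar_strings : Prop := ∀ (strings : List String), Dom_group_similar_strings strings → Spec_group_similar_strings strings (group_similar_strings strings)

-- ===== LEMMAS AND PROOFS =====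

-- the words of a string, as A computes them for group keys (k.lower().split())
def pvWords (k : String) : List String := PySem.Str.split₀ (PySem.Str.lower k)

-- k shares a significant (>3 chars) word with the word list ws
def pvSharesB (ws : List String) (k : String) : Bool :=
  ws.any (fun w => decide (w ∈ pvWords k) && decide (3 < PySem.Str.len w))

lemma pvSharesB_iff (ws : List String) (k : String) :
    pvSharesB ws k = true ↔ ∃ w, w ∈ ws ∧ w ∈ pvWords k ∧ 3 < PySem.Str.len w := by
  simp [pvSharesB, List.any_eq_true]

-- .split() ignores surrounding whitespace: helper facts about split₀.go
lemma pv_go_all_ws (ws : List Char) (h : ∀ c ∈ ws, PySem.Chars.isspace c = true) (acc : List (List Char)) :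
    PySem.Chars.split₀.go ws [] acc = acc.reverse := by
  induction ws generalizing acc with
  | nil => simp [PySem.Chars.split₀.go]
  | cons c rest ih =>
    rw [PySem.Chars.split₀.go]
    rw [if_pos (h c List.mem_cons_self)]
    simp only [List.isEmpty_nil, if_true]
    exact ih (fun c' hc' => h c' (List.mem_cons_of_mem _ hc')) acc

lemma pv_go_lstrip (s : List Char) (acc : List (List Char)) :
    PySem.Chars.split₀.go (List.dropWhile PySem.Chars.isspace s) [] acc = PySem.Chars.split₀.go s [] acc := by
  induction s generalizing acc with
  | nil => rfl
  | cons c rest ih =>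
    by_cases hc : PySem.Chars.isspace c = true
    · rw [List.dropWhile_cons_of_pos hc]
      rw [ih]
      conv_rhs => rw [PySem.Chars.split₀.go]
      rw [if_pos hc]
      simp
    · rw [List.dropWhile_cons_of_neg hc]

lemma pv_go_append_ws (ws : List Char) (h : ∀ c ∈ ws, PySem.Chars.isspace c = true)
    (t : List Char) (cur : List Char) (acc : List (List Char)) :
    PySem.Chars.split₀.go (t ++ ws) cur acc = PySem.Chars.split₀.go t cur acc := by
  induction t generalizing cur acc with
  | nil =>
    simp only [List.nil_append]
    cases ws with
    | nil => rfl
    | cons c rest =>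
      conv_lhs => rw [PySem.Chars.split₀.go]
      conv_rhs => rw [PySem.Chars.split₀.go]
      rw [if_pos (h c List.mem_cons_self)]
      by_cases hcur : cur.isEmpty = true
      · rw [if_pos hcur, if_pos hcur]
        exact pv_go_all_ws rest (fun c' hc' => h c' (List.mem_cons_of_mem _ hc')) acc
      · rw [if_neg hcur, if_neg hcur]
        rw [pv_go_all_ws rest (fun c' hc' => h c' (List.mem_cons_of_mem _ hc'))]
  | cons c t' ih =>
    rw [List.cons_append]
    conv_lhs => rw [PySem.Chars.split₀.go]
    conv_rhs => rw [PySem.Chars.split₀.go]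
    by_cases hc : PySem.Chars.isspace c = true
    · rw [if_pos hc, if_pos hc]
      by_cases hcur : cur.isEmpty = true
      · rw [if_pos hcur, if_pos hcur, ih]
      · rw [if_neg hcur, if_neg hcur, ih]
    · rw [if_neg hc, if_neg hc, ih]

lemma pv_split_strip (cs : List Char) :
    PySem.Chars.split₀ (PySem.Chars.strip cs) = PySem.Chars.split₀ cs := by
  unfold PySem.Chars.strip PySem.Chars.split₀
  have hl : PySem.Chars.split₀.go (PySem.Chars.lstrip cs) [] [] = PySem.Chars.split₀.go cs [] [] := by
    unfold PySem.Chars.lstrip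
    exact pv_go_lstrip cs []
  rw [← hl]
  set m := PySem.Chars.lstrip cs with hm
  have hdecomp : m = PySem.Chars.rstrip m ++ (List.takeWhile PySem.Chars.isspace m.reverse).reverse := by
    unfold PySem.Chars.rstrip
    conv_lhs => rw [← List.reverse_reverse m, ← List.takeWhile_append_dropWhile (p := PySem.Chars.isspace) (l := m.reverse)]
    rw [List.reverse_append]
  have hws : ∀ c ∈ (List.takeWhile PySem.Chars.isspace m.reverse).reverse, PySem.Chars.isspace c = true := by
    intro c hc
    rw [List.mem_reverse] at hc
    exact List.mem_takeWhile_imp hc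
  conv_rhs => rw [hdecomp]
  rw [pv_go_append_ws _ hws]

-- A's s_lower = s.lower().strip() splits into the same words as s.lower()
lemma pv_wordsA (s : String) :
    PySem.Str.split₀ (PySem.Str.strip (PySem.Str.lower s)) = pvWords s := by
  unfold pvWords PySem.Str.split₀
  rw [PySem.Str.toList_strip, pv_split_strip]

-- A's inner loop is first-match over the keys
lemma pv_findGroup_eq (ws : List String) (keys : List String) :
    pvFindGroup (PySem.Set.ofList ws) keys = keys.find? (fun k => pvSharesB ws k) := by
  induction keys with
  | nil => rfl
  | cons k rest ih =>
    rw [pvFindGroup, List.find?_cons]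
    have hiff : ((PySem.Set.inter (PySem.Set.ofList ws) (PySem.Set.ofList (PySem.Str.split₀ (PySem.Str.lower k)))).filter
          (fun w => decide (3 < PySem.Str.len w))).isEmpty = !pvSharesB ws k := by
      rcases h : pvSharesB ws k with _ | _
      · have hns : ¬ ∃ w, w ∈ ws ∧ w ∈ pvWords k ∧ 3 < PySem.Str.len w := by
          rw [← pvSharesB_iff ws k, h]
          simp
        simp only [Bool.not_false, List.isEmpty_iff]
        rw [List.filter_eq_nil_iff]
        intro w hw
        rw [PySem.Set.mem_inter, PySem.Set.mem_ofList, PySem.Set.mem_ofList] at hw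
        simp only [decide_eq_true_eq]
        intro hlen
        exact hns ⟨w, hw.1, hw.2, hlen⟩
      · obtain ⟨w, hw1, hw2, hw3⟩ := (pvSharesB_iff ws k).mp h
        simp only [Bool.not_true]
        rw [List.isEmpty_eq_false_iff_exists_mem]
        exact ⟨w, List.mem_filter.mpr ⟨(PySem.Set.mem_inter _ _ _).mpr ⟨(PySem.Set.mem_ofList _ _).mpr hw1,
          (PySem.Set.mem_ofList _ _).mpr hw2⟩, decide_eq_true hw3⟩⟩
    rw [hiff]
    rcases h : pvSharesB ws k with _ | _
    · simpa using ih
    · simp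

-- find?: everything strictly before the hit fails the test
lemma pv_find?_first {α : Type} [DecidableEq α] (l : List α) (p : α → Bool) (k : α)
    (h : l.find? p = some k) (k' : α) (hk' : k' ∈ l) (hlt : l.idxOf k' < l.idxOf k) :
    p k' = false := by
  induction l with
  | nil => cases hk'
  | cons a t ih =>
    rw [List.find?_cons] at h
    by_cases hpa : p a = true
    · simp [hpa] at h
      subst h
      simp [List.idxOf_cons] at hlt
    · simp [hpa] at h
      have hka : k ≠ a := by rintro rfl; rw [List.find?_some h] at hpa; exact hpa rfl
      rcases List.mem_cons.mp hk' with rfl | hk't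
      · simpa using hpa
      · by_cases hk'a : k' = a
        · subst hk'a; simpa using hpa
        · apply ih h hk't
          have h1 : (a == k') = false := by
            simp only [beq_eq_false_iff_ne, ne_eq]; exact fun hh => hk'a hh.symm
          have h2 : (a == k) = false := by
            simp only [beq_eq_false_iff_ne, ne_eq]; exact fun hh => hka hh.symm
          simp only [List.idxOf_cons, h1, h2, cond_false] at hlt
          omega

-- closed form of the registration loop
lemma pv_register_get? (ws : List String) (ix : PySem.Dict String (Int × String)) (pos : Int)
    (s : String) (w : String) :
    (pvRegister ix ws pos s).get? w =
      match ix.get? w with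
      | some e => some e
      | none => if w ∈ ws ∧ 3 < PySem.Str.len w then some (pos, s) else none := by
  unfold pvRegister
  induction ws generalizing ix with
  | nil =>
    rcases h : ix.get? w with _ | e <;> simp [h]
  | cons w0 rest ih =>
    simp only [List.foldl_cons]
    by_cases hsig : 3 < PySem.Str.len w0
    · by_cases hcont : ix.contains w0 = true
      · rw [show (decide (3 < PySem.Str.len w0) && !ix.contains w0) = false by
          rw [decide_eq_true hsig]; simp [hcont]]
        simp only [if_false, Bool.false_eq_true]
        rw [ih ix]
        rcases h : ix.get? w with _ | e
        · by_cases hw0 : w = w0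
          · subst hw0
            rw [PySem.Dict.contains_eq_isSome_get?, h] at hcont
            simp at hcont
          · simp only [List.mem_cons]
            have : (w ∈ rest ∧ 3 < PySem.Str.len w) ↔ ((w = w0 ∨ w ∈ rest) ∧ 3 < PySem.Str.len w) := by
              constructor
              · rintro ⟨hm, hs⟩; exact ⟨Or.inr hm, hs⟩
              · rintro ⟨hm | hm, hs⟩
                · exact absurd hm hw0
                · exact ⟨hm, hs⟩
            rw [if_congr this rfl rfl]
        · rfl
      · rw [show (decide (3 < PySem.Str.len w0) && !ix.contains w0) = true by
          rw [decide_eq_true hsig]; simp [hcont]]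
        simp only [if_true]
        rw [ih (ix.insert w0 (pos, s))]
        by_cases hw0 : w = w0
        · subst hw0
          rw [PySem.Dict.get?_insert_self]
          have h0 : ix.get? w = none := by
            rw [PySem.Dict.get?_eq_none_iff_contains]
            simpa using hcont
          rw [h0]
          simp only [List.mem_cons, true_or, true_and, if_pos hsig]
        · rw [PySem.Dict.get?_insert_of_ne (hne := hw0)]
          rcases h : ix.get? w with _ | e
          · simp only [List.mem_cons]
            have : (w ∈ rest ∧ 3 < PySem.Str.len w) ↔ ((w = w0 ∨ w ∈ rest) ∧ 3 < PySem.Str.len w) := by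
              constructor
              · rintro ⟨hm, hs⟩; exact ⟨Or.inr hm, hs⟩
              · rintro ⟨hm | hm, hs⟩
                · exact absurd hm hw0
                · exact ⟨hm, hs⟩
            rw [if_congr this rfl rfl]
          · rfl
    · rw [show (decide (3 < PySem.Str.len w0) && !ix.contains w0) = false by
        rw [decide_eq_false hsig]; simp]
      simp only [if_false, Bool.false_eq_true]
      rw [ih ix]
      rcases h : ix.get? w with _ | e
      · simp only [List.mem_cons]
        have heq : (w ∈ rest ∧ 3 < PySem.Str.len w) ↔ ((w = w0 ∨ w ∈ rest) ∧ 3 < PySem.Str.len w) := by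
          constructor
          · rintro ⟨hm, hs⟩; exact ⟨Or.inr hm, hs⟩
          · rintro ⟨hm | hm, hs⟩
            · subst hm; exact absurd hs hsig
            · exact ⟨hm, hs⟩
        rw [if_congr heq rfl rfl]
      · rfl

lemma pv_register_get?_some {ws : List String} {ix : PySem.Dict String (Int × String)} {pos : Int}
    {s : String} {w : String} {e : Int × String} (h : ix.get? w = some e) :
    (pvRegister ix ws pos s).get? w = some e := by
  rw [pv_register_get?, h]

lemma pv_register_get?_none {ws : List String} {ix : PySem.Dict String (Int × String)} {pos : Int}
    {s : String} {w : String} (h : ix.get? w = none) :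
    (pvRegister ix ws pos s).get? w =
      if w ∈ ws ∧ 3 < PySem.Str.len w then some (pos, s) else none := by
  rw [pv_register_get?, h]

-- the best-entry loop returns the minimal entry t among the candidates
lemma pv_best_eq (ix : PySem.Dict String (Int × String)) (t : Int × String) (ws : List String)
    (hall : ∀ w ∈ ws, 3 < PySem.Str.len w → ∀ e, ix.get? w = some e → e = t ∨ t.1 < e.1)
    (hex : ∃ w ∈ ws, 3 < PySem.Str.len w ∧ ix.get? w = some t) :
    pvBest ix ws = some t := by
  suffices hgo : ∀ acc : Option (Int × String),
      (∀ w ∈ ws, 3 < PySem.Str.len w → ∀ e, ix.get? w = some e → e = t ∨ t.1 < e.1) →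
      (acc = none ∨ acc = some t ∨ ∃ b, acc = some b ∧ t.1 < b.1) →
      ((∃ w ∈ ws, 3 < PySem.Str.len w ∧ ix.get? w = some t) ∨ acc = some t) →
      ws.foldl (fun best w =>
        if 3 < PySem.Str.len w then
          match ix.get? w with
          | some e =>
            match best with
            | none => some e
            | some b => if e.1 < b.1 then some e else some b
          | none => best
        else best) acc = some t by
    exact hgo none hall (Or.inl rfl) (Or.inl hex)
  clear hall hex
  induction ws with
  | nil =>
    intro acc _ hacc hex
    rcases hex with ⟨w, hw, _⟩ | h
    · cases hw
    · simpa using h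
  | cons w rest ih =>
    intro acc hall hacc hex
    simp only [List.foldl_cons]
    have hall' : ∀ w' ∈ rest, 3 < PySem.Str.len w' → ∀ e, ix.get? w' = some e → e = t ∨ t.1 < e.1 :=
      fun w' hw' => hall w' (List.mem_cons_of_mem _ hw')
    by_cases hsig : 3 < PySem.Str.len w
    · rcases hget : ix.get? w with _ | e
      · simp only [if_pos hsig]
        apply ih acc hall' hacc
        rcases hex with ⟨w0, hw0, hs0, hg0⟩ | h
        · rcases List.mem_cons.mp hw0 with rfl | hr
          · rw [hg0] at hget; cases hget
          · exact Or.inl ⟨w0, hr, hs0, hg0⟩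
        · exact Or.inr h
      · have he := hall w List.mem_cons_self hsig e hget
        rcases hacc with rfl | rfl | ⟨b, rfl, hb⟩
        · simp only [if_pos hsig]
          apply ih (some e) hall'
          · rcases he with rfl | hlt
            · exact Or.inr (Or.inl rfl)
            · exact Or.inr (Or.inr ⟨e, rfl, hlt⟩)
          · rcases hex with ⟨w0, hw0, hs0, hg0⟩ | h
            · rcases List.mem_cons.mp hw0 with rfl | hr
              · rw [hg0] at hget
                injection hget with he'; rw [he']
                exact Or.inr rfl
              · exact Or.inl ⟨w0, hr, hs0, hg0⟩
            · cases h
        · have hnot : ¬ (e.1 < t.1) := by rcases he with rfl | hlt <;> omega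
          simp only [if_pos hsig, if_neg hnot]
          exact ih (some t) hall' (Or.inr (Or.inl rfl)) (Or.inr rfl)
        · simp only [if_pos hsig]
          by_cases hc : e.1 < b.1
          · rw [if_pos hc]
            apply ih (some e) hall'
            · rcases he with rfl | hlt
              · exact Or.inr (Or.inl rfl)
              · exact Or.inr (Or.inr ⟨e, rfl, hlt⟩)
            · rcases hex with ⟨w0, hw0, hs0, hg0⟩ | h
              · rcases List.mem_cons.mp hw0 with rfl | hr
                · rw [hg0] at hget
                  injection hget with he'; rw [he']
                  exact Or.inr rfl
                · exact Or.inl ⟨w0, hr, hs0, hg0⟩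
              · injection h with h'; rw [h'] at hb; omega
          · rw [if_neg hc]
            apply ih (some b) hall' (Or.inr (Or.inr ⟨b, rfl, hb⟩))
            rcases hex with ⟨w0, hw0, hs0, hg0⟩ | h
            · rcases List.mem_cons.mp hw0 with rfl | hr
              · rw [hg0] at hget
                injection hget with he'
                rw [he'] at hb
                exact absurd hb hc
              · exact Or.inl ⟨w0, hr, hs0, hg0⟩
            · exact Or.inr h
    · simp only [if_neg hsig]
      apply ih acc hall' hacc
      rcases hex with ⟨w0, hw0, hs0, hg0⟩ | h
      · rcases List.mem_cons.mp hw0 with rfl | hr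
        · exact absurd hs0 hsig
        · exact Or.inl ⟨w0, hr, hs0, hg0⟩
      · exact Or.inr h

lemma pv_best_none (ix : PySem.Dict String (Int × String)) (ws : List String)
    (h : ∀ w ∈ ws, 3 < PySem.Str.len w → ix.get? w = none) :
    pvBest ix ws = none := by
  unfold pvBest
  induction ws with
  | nil => rfl
  | cons w rest ih =>
    simp only [List.foldl_cons]
    by_cases hsig : 3 < PySem.Str.len w
    · rw [if_pos hsig, h w List.mem_cons_self hsig]
      exact ih (fun w' hw' => h w' (List.mem_cons_of_mem _ hw'))
    · rw [if_neg hsig]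
      exact ih (fun w' hw' => h w' (List.mem_cons_of_mem _ hw'))

-- the invariant tying B's word index to A's groups dict:
-- every index entry names the first key owning its word, positions order like the key list,
-- and every significant word of an existing key is indexed
def pvInv (g : PySem.Dict String (List String)) (ix : PySem.Dict String (Int × String))
    (pos : Int) : Prop :=
  (∀ w p k, ix.get? w = some (p, k) →
      k ∈ g.keys ∧ w ∈ pvWords k ∧ 3 < PySem.Str.len w ∧ p < pos ∧
      ∀ k' ∈ g.keys, w ∈ pvWords k' → g.keys.idxOf k ≤ g.keys.idxOf k') ∧
  (∀ k ∈ g.keys, ∀ w ∈ pvWords k, 3 < PySem.Str.len w → (ix.get? w).isSome) ∧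
  (∀ w w' p p' k k', ix.get? w = some (p, k) → ix.get? w' = some (p', k') →
      (p < p' ↔ g.keys.idxOf k < g.keys.idxOf k'))

lemma pv_step (g : PySem.Dict String (List String)) (ix : PySem.Dict String (Int × String))
    (pos : Int) (s : String) (hinv : pvInv g ix pos) :
    pvStepA g s = (pvStepB (g, ix, pos) s).1 ∧
    pvInv (pvStepB (g, ix, pos) s).1 (pvStepB (g, ix, pos) s).2.1 (pvStepB (g, ix, pos) s).2.2 := by
  obtain ⟨ha, hb, hc⟩ := hinv
  have hstepA : pvStepA g s =
      match g.keys.find? (fun k => pvSharesB (pvWords s) k) with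
      | some k => g.modify k [] (fun v => v ++ [s])
      | none => g.insert s [s] := by
    simp only [pvStepA]
    rw [pv_wordsA, pv_findGroup_eq]
  rcases hF : g.keys.find? (fun k => pvSharesB (pvWords s) k) with _ | kF
  · -- NO MATCHING GROUP: a fresh group is created and its significant words indexed
    have hnone : ∀ k ∈ g.keys, ¬ ∃ w, w ∈ pvWords s ∧ w ∈ pvWords k ∧ 3 < PySem.Str.len w := by
      intro k hk hsh
      have hfalse := List.find?_eq_none.mp hF k hk
      rw [(pvSharesB_iff (pvWords s) k).mpr hsh] at hfalse
      exact hfalse rfl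
    have hbestnone : pvBest ix (pvWords s) = none := by
      apply pv_best_none
      intro w hw hlen
      rcases hget : ix.get? w with _ | e
      · rfl
      · obtain ⟨hkmem, hwk, _, _, _⟩ := ha w e.1 e.2 (by rw [hget])
        exact absurd ⟨w, hw, hwk, hlen⟩ (hnone e.2 hkmem)
    have hstepB : pvStepB (g, ix, pos) s = (g.insert s [s], pvRegister ix (pvWords s) pos s, pos + 1) := by
      simp only [pvStepB]
      rw [show PySem.Str.split₀ (PySem.Str.lower s) = pvWords s from rfl, hbestnone]
    rw [hstepB, hstepA, hF]
    have hclass : ∀ w p k, (pvRegister ix (pvWords s) pos s).get? w = some (p, k) →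
        (ix.get? w = some (p, k)) ∨
        (ix.get? w = none ∧ w ∈ pvWords s ∧ 3 < PySem.Str.len w ∧ p = pos ∧ k = s) := by
      intro w p k hget'
      rcases h : ix.get? w with _ | e
      · rw [pv_register_get?_none (h := h)] at hget'
        split_ifs at hget' with hcond
        · injection hget' with h2
          cases h2
          exact Or.inr ⟨rfl, hcond.1, hcond.2, rfl, rfl⟩
      · rw [pv_register_get?_some (h := h)] at hget'
        exact Or.inl hget'
    have hregsome : ∀ w, (ix.get? w).isSome → (pvRegister ix (pvWords s) pos s).get? w = ix.get? w := by
      intro w hw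
      rcases h : ix.get? w with _ | e
      · rw [h] at hw; cases hw
      · exact pv_register_get?_some (h := h)
    by_cases hcont : g.contains s = true
    · -- s is already a key; it then has no significant words, so nothing changes but pos
      have hskeys : s ∈ g.keys := (PySem.Dict.contains_iff_mem_keys _ _).mp hcont
      have hnosig : ∀ w ∈ pvWords s, ¬ 3 < PySem.Str.len w := by
        intro w hw hlen
        exact hnone s hskeys ⟨w, hw, hw, hlen⟩
      have hkeys' : (g.insert s [s]).keys = g.keys := PySem.Dict.keys_insert_of_contains _ _ hcont
      refine ⟨rfl, ?_, ?_, ?_⟩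
      · simp only []
        rw [hkeys']
        intro w p k hget'
        rcases hclass w p k hget' with hold | ⟨_, hw, hlen, _, _⟩
        · obtain ⟨h1, h2, h3, h4, h5⟩ := ha w p k hold
          exact ⟨h1, h2, h3, by omega, h5⟩
        · exact absurd hlen (hnosig _ hw)
      · simp only []
        rw [hkeys']
        intro k hk w hw hlen
        rw [hregsome w (hb k hk w hw hlen)]
        exact hb k hk w hw hlen
      · simp only []
        rw [hkeys']
        intro w w' p p' k k' hg hg'
        rcases hclass w p k hg with hold | ⟨_, hw, hlen, _, _⟩
        · rcases hclass w' p' k' hg' with hold' | ⟨_, hw', hlen', _, _⟩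
          · exact hc w w' p p' k k' hold hold'
          · exact absurd hlen' (hnosig _ hw')
        · exact absurd hlen (hnosig _ hw)
    · -- s is a brand-new key, appended at the end of the key list
      have hsnot : s ∉ g.keys := by
        intro hmem
        exact hcont ((PySem.Dict.contains_iff_mem_keys _ _).mpr hmem)
      have hkeys' : (g.insert s [s]).keys = g.keys ++ [s] :=
        PySem.Dict.keys_insert_of_not_contains _ _ (by simpa using hcont)
      have hidxmem : ∀ k ∈ g.keys, (g.keys ++ [s]).idxOf k = g.keys.idxOf k := by
        intro k hk
        rw [List.idxOf_append]
        simp [hk]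
      have hidxs : (g.keys ++ [s]).idxOf s = g.keys.length := by
        rw [List.idxOf_append]
        simp [hsnot]
      have hfresh : ∀ w ∈ pvWords s, 3 < PySem.Str.len w → ix.get? w = none := by
        intro w hw hlen
        rcases h : ix.get? w with _ | e
        · rfl
        · obtain ⟨h1, h2, _, _, _⟩ := ha w e.1 e.2 (by rw [h])
          exact absurd ⟨w, hw, h2, hlen⟩ (hnone e.2 h1)
      refine ⟨rfl, ?_, ?_, ?_⟩
      · simp only []
        rw [hkeys']
        intro w p k hget'
        rcases hclass w p k hget' with hold | ⟨_, hw, hlen, hp, hk⟩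
        · obtain ⟨h1, h2, h3, h4, h5⟩ := ha w p k hold
          refine ⟨List.mem_append_left _ h1, h2, h3, by omega, ?_⟩
          intro k' hk' hwk'
          rcases List.mem_append.mp hk' with hk'g | hk's
          · rw [hidxmem k h1, hidxmem k' hk'g]
            exact h5 k' hk'g hwk'
          · rw [List.mem_singleton] at hk's
            subst hk's
            rw [hidxmem k h1, hidxs]
            exact Nat.le_of_lt (List.idxOf_lt_length_of_mem h1)
        · subst hp; subst hk
          refine ⟨List.mem_append_right _ (List.mem_singleton_self _), hw, hlen, by omega, ?_⟩
          intro k' hk' hwk'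
          rcases List.mem_append.mp hk' with hk'g | hk's
          · have := hb k' hk'g w hwk' hlen
            rw [hfresh w hw hlen] at this
            cases this
          · rw [List.mem_singleton] at hk's
            subst hk's
            exact Nat.le_refl _
      · simp only []
        rw [hkeys']
        intro k hk w hw hlen
        rcases List.mem_append.mp hk with hkg | hks
        · rw [hregsome w (hb k hkg w hw hlen)]
          exact hb k hkg w hw hlen
        · rw [List.mem_singleton] at hks
          subst hks
          rcases h : ix.get? w with _ | e
          · rw [pv_register_get?_none (h := h), if_pos ⟨hw, hlen⟩]
            rfl
          · rw [pv_register_get?_some (h := h)]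
            rfl
      · simp only []
        rw [hkeys']
        intro w w' p p' k k' hg hg'
        rcases hclass w p k hg with hold | ⟨hn, hw, hlen, hp, hk⟩
        · obtain ⟨h1, _, _, h4, _⟩ := ha w p k hold
          rcases hclass w' p' k' hg' with hold' | ⟨hn', hw', hlen', hp', hk'⟩
          · obtain ⟨h1', _, _, _, _⟩ := ha w' p' k' hold'
            rw [hidxmem k h1, hidxmem k' h1']
            exact hc w w' p p' k k' hold hold'
          · subst hp'; subst hk'
            rw [hidxmem k h1, hidxs]
            exact iff_of_true h4 (List.idxOf_lt_length_of_mem h1)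
        · subst hp; subst hk
          rcases hclass w' p' k' hg' with hold' | ⟨hn', hw', hlen', hp', hk'⟩
          · obtain ⟨h1', _, _, h4', _⟩ := ha w' p' k' hold'
            rw [hidxs, hidxmem k' h1']
            exact iff_of_false (by omega) (by
              have := List.idxOf_lt_length_of_mem h1'
              omega)
          · subst hp'; subst hk'
            rw [hidxs]
            exact iff_of_false (by omega) (by omega)
  · -- MATCHING GROUP kF: B's minimal index entry names exactly kF
    have hkFmem : kF ∈ g.keys := List.mem_of_find?_eq_some hF
    have hkFsh := (pvSharesB_iff (pvWords s) kF).mp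
      (List.find?_some (p := fun k => pvSharesB (pvWords s) k) hF)
    obtain ⟨w0, hw0s, hw0k, hw0len⟩ := hkFsh
    have h0 : (ix.get? w0).isSome := hb kF hkFmem w0 hw0k hw0len
    rcases hget0 : ix.get? w0 with _ | e0
    · rw [hget0] at h0; cases h0
    · obtain ⟨hk0mem, hw0k0, _, hp0pos, hfirst0⟩ := ha w0 e0.1 e0.2 (by rw [hget0])
      have hidx_le : g.keys.idxOf e0.2 ≤ g.keys.idxOf kF := hfirst0 kF hkFmem hw0k
      have hnlt : ¬ g.keys.idxOf e0.2 < g.keys.idxOf kF := by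
        intro hlt
        have hff := pv_find?_first _ _ _ hF e0.2 hk0mem hlt
        rw [(pvSharesB_iff (pvWords s) e0.2).mpr ⟨w0, hw0s, hw0k0, hw0len⟩] at hff
        cases hff
      have hkeq : e0.2 = kF := (List.idxOf_inj hk0mem).mp (Nat.le_antisymm hidx_le (Nat.le_of_not_lt hnlt))
      have hall : ∀ w ∈ pvWords s, 3 < PySem.Str.len w → ∀ e, ix.get? w = some e → e = e0 ∨ e0.1 < e.1 := by
        intro w hw hlen e hget
        obtain ⟨hkmem, hwk, _, _, hfirst⟩ := ha w e.1 e.2 (by rw [hget])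
        have hknlt : ¬ g.keys.idxOf e.2 < g.keys.idxOf kF := by
          intro hlt
          have hff := pv_find?_first _ _ _ hF e.2 hkmem hlt
          rw [(pvSharesB_iff (pvWords s) e.2).mpr ⟨w, hw, hwk, hlen⟩] at hff
          cases hff
        rw [← hkeq] at hknlt
        by_cases hlt2 : g.keys.idxOf e0.2 < g.keys.idxOf e.2
        · right
          exact (hc w0 w e0.1 e.1 e0.2 e.2 (by rw [hget0]) (by rw [hget])).mpr hlt2
        · have hie : g.keys.idxOf e.2 = g.keys.idxOf e0.2 :=
            Nat.le_antisymm (Nat.le_of_not_lt hlt2) (Nat.le_of_not_lt hknlt)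
          have hke : e.2 = e0.2 := (List.idxOf_inj hkmem).mp hie
          have hple : ¬ e.1 < e0.1 := by
            have := hc w w0 e.1 e0.1 e.2 e0.2 (by rw [hget]) (by rw [hget0])
            rw [hie] at this
            simp at this
            omega
          have hpge : ¬ e0.1 < e.1 := by
            have := hc w0 w e0.1 e.1 e0.2 e.2 (by rw [hget0]) (by rw [hget])
            rw [hie] at this
            simp at this
            omega
          left
          exact Prod.ext (by omega) hke
      have hbest : pvBest ix (pvWords s) = some e0 :=
        pv_best_eq ix e0 (pvWords s) hall ⟨w0, hw0s, hw0len, hget0⟩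
      have hstepB : pvStepB (g, ix, pos) s = (g.modify e0.2 [] (fun v => v ++ [s]), ix, pos) := by
        simp only [pvStepB]
        rw [show PySem.Str.split₀ (PySem.Str.lower s) = pvWords s from rfl, hbest]
      rw [hstepB, hstepA, hF, hkeq]
      have hkeys : (g.modify kF [] (fun v => v ++ [s])).keys = g.keys := by
        rw [PySem.Dict.keys_modify]
        exact PySem.Dict.keys_insert_of_contains _ _ ((PySem.Dict.contains_iff_mem_keys _ _).mpr hkFmem)
      refine ⟨rfl, ?_, ?_, ?_⟩
      · simp only []
        rw [hkeys]
        exact ha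
      · simp only []
        rw [hkeys]
        exact hb
      · simp only []
        rw [hkeys]
        exact hc

lemma pv_fold (strings : List String) (g : PySem.Dict String (List String))
    (ix : PySem.Dict String (Int × String)) (pos : Int) (hinv : pvInv g ix pos) :
    strings.foldl pvStepA g = (strings.foldl pvStepB (g, ix, pos)).1 := by
  induction strings generalizing g ix pos with
  | nil => rfl
  | cons s rest ih =>
    simp only [List.foldl_cons]
    obtain ⟨heq, hinv'⟩ := pv_step g ix pos s hinv
    rcases hst : pvStepB (g, ix, pos) s with ⟨g', ix', pos'⟩
    rw [hst] at heq hinv'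
    rw [heq]
    exact ih g' ix' pos' hinv'

-- ===== VERDICT (by name: the statement is the Claim_ definition above) =====
theorem group_similar_strings_spec : Claim_equal_group_similar_strings := by
  intro strings _
  show _ = _
  unfold group_similar_strings group_similar_strings_alt
  have h := pv_fold strings PySem.Dict.empty PySem.Dict.empty 0 (by
    refine ⟨?_, ?_, ?_⟩ <;> (intros; simp_all [PySem.Dict.get?_empty]))
  cases strings with
  | nil => simp [PySem.Dict.empty]
  | cons a t => simp only [List.isEmpty_cons, Bool.false_eq_true, if_false, h]
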